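-- pv_equiv track=rewrite | github.com/omerbarda/wave | wave_editor.py | audio_fade
-- ===== SOURCE A (Python) =====
-- def average_of_lists(*lists):
--     '''return the average between given list with 2 values'''
--     lists_count = len(lists)
--     first_average = 0
--     second_average = 0
--     for list in lists:
--         first_average += list[0]
--         second_average += list[1]
--     first_average = int(first_average/lists_count)
--     second_average = int(second_average/lists_count)
--     average_list = [first_average, second_average]
--     return average_list
--
-- def audio_fade(audio_list):
--     '''fade the audio by doing an average of 3 followers in the sequence'''
--     new_list = []
--     new_list.append(average_of_lists(audio_list[0],audio_list[1]))
--     for i in range(1,len(audio_list)-1):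
--         new_list.append(average_of_lists(audio_list[i-1],audio_list[i],
--                                        audio_list[i+1]))
--     new_list.append(average_of_lists(audio_list[-2],audio_list[-1]))
--     return new_list
-- ===== SOURCE B (Python) =====
-- def audio_fade(audio_list):
--     '''fade the audio: per-channel sliding window (transpose, 1-D fade, recombine)'''
--     lefts = [x[0] for x in audio_list]
--     rights = [x[1] for x in audio_list]
--     def fade(c):
--         mids = [int((a + b + d) / 3) for a, b, d in zip(c, c[1:], c[2:])]
--         return [int((c[0] + c[1]) / 2)] + mids + [int((c[-2] + c[-1]) / 2)]
--     return [[l, r] for l, r in zip(fade(lefts), fade(rights))]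
-- ===== Notes on version B (the rewrite author's own statement) =====
-- stated objective: alternative
-- what changed: B transposes the samples into two scalar channel lists and fades each channel independently with a zip-of-shifted-lists sliding window, recombining with zip, instead of A's index loop calling a varargs pairwise-averaging helper on whole sample pairs.
import Mathlib
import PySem

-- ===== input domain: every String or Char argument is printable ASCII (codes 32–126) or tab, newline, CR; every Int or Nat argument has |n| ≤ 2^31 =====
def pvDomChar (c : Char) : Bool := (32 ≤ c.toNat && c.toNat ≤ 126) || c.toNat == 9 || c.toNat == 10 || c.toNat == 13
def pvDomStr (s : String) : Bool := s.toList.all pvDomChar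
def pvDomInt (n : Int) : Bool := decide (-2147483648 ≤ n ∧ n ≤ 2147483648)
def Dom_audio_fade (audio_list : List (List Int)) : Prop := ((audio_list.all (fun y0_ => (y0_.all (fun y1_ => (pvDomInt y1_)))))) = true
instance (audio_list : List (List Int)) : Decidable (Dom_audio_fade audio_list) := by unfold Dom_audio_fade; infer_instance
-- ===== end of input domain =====

-- B transposes the samples into two scalar channels and fades each channel with a
-- zip-of-shifted-lists sliding window, instead of A's paired-window averaging helper
-- over index ranges (objective: alternative decomposition, same cost).


-- ===== PORT A =====
-- average_of_lists(*lists): sums column 0 and column 1, then int(sum/count).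
-- int(x/n) is exact truncating division here (|sum| ≤ 3·2^31 < 2^53 on Dom): PySem.Int.truncdiv.
def pvAvgOfLists (lists : List (List Int)) : List Int :=
  let cnt : Int := lists.length
  let fa : Int := lists.foldl (fun s l => s + PySem.List.pyGetD l 0 0) 0
  let sa : Int := lists.foldl (fun s l => s + PySem.List.pyGetD l 1 0) 0
  [PySem.Int.truncdiv fa cnt, PySem.Int.truncdiv sa cnt]

def audio_fade (audio_list : List (List Int)) : List (List Int) :=
  let g : Int → List Int := fun i => PySem.List.pyGetD audio_list i []
  let new0 := [pvAvgOfLists [g 0, g 1]]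
  let mid := (PySem.List.pyRange 1 (PySem.List.len audio_list - 1) 1).foldl
    (fun acc i => acc ++ [pvAvgOfLists [g (i - 1), g i, g (i + 1)]]) new0
  mid ++ [pvAvgOfLists [g (-2), g (-1)]]

-- ===== PORT B =====
-- fade(c): c[1:] / c[2:] are List.drop 1 / List.drop 2 (exact for nonnegative slice starts).
def pvFadeChannel (c : List Int) : List Int :=
  let mids := ((c.zip (c.drop 1)).zip (c.drop 2)).map
    (fun p => PySem.Int.truncdiv (p.1.1 + p.1.2 + p.2) 3)
  [PySem.Int.truncdiv (PySem.List.pyGetD c 0 0 + PySem.List.pyGetD c 1 0) 2]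
    ++ mids
    ++ [PySem.Int.truncdiv (PySem.List.pyGetD c (-2) 0 + PySem.List.pyGetD c (-1) 0) 2]

def audio_fade_alt (audio_list : List (List Int)) : List (List Int) :=
  let lefts := audio_list.map (fun x => PySem.List.pyGetD x 0 0)
  let rights := audio_list.map (fun x => PySem.List.pyGetD x 1 0)
  ((pvFadeChannel lefts).zip (pvFadeChannel rights)).map (fun p => [p.1, p.2])

-- ===== PRECONDITION & SPEC =====
-- Python A raises IndexError when the list has fewer than 2 samples or any sample has
-- fewer than 2 channel values; exactly those inputs are excluded.
def Pre_audio_fade (audio_list : List (List Int)) : Prop :=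
  2 ≤ audio_list.length ∧ ∀ row ∈ audio_list, 2 ≤ row.length
instance (audio_list : List (List Int)) : Decidable (Pre_audio_fade audio_list) := by
  unfold Pre_audio_fade; infer_instance
def pvWitness_audio_fade : List (List Int) := [[1, 2], [3, 4], [5, 6]]
def Spec_audio_fade (audio_list : List (List Int)) (out : List (List Int)) : Prop := out = audio_fade_alt audio_list
instance (audio_list : List (List Int)) (out : List (List Int)) : Decidable (Spec_audio_fade audio_list out) := by unfold Spec_audio_fade; infer_instance

-- ===== CLAIM (what is proved, stated in full; the proofs are below) =====
def Claim_equal_audio_fade : Prop := ∀ (audio_list : List (List Int)), Dom_audio_fade audio_list → Pre_audio_fade audio_list → Spec_audio_fade audio_list (audio_fade audio_list)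

-- ===== LEMMAS AND PROOFS =====

-- the value both programs put at position k (channel view)
def pvFadeVal (v : List Int) (k : Nat) : Int :=
  if k = 0 then PySem.Int.truncdiv (v.getD 0 0 + v.getD 1 0) 2
  else if k = v.length - 1 then
    PySem.Int.truncdiv (v.getD (v.length - 2) 0 + v.getD (v.length - 1) 0) 2
  else PySem.Int.truncdiv (v.getD (k - 1) 0 + v.getD k 0 + v.getD (k + 1) 0) 3

lemma pvFade_len (v : List Int) (hv : 2 ≤ v.length) :
    (pvFadeChannel v).length = v.length := by
  simp [pvFadeChannel]; omega

lemma pvFade_get (v : List Int) (hv : 2 ≤ v.length) (k : Nat) (hk : k < v.length) :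
    (pvFadeChannel v)[k]? = some (pvFadeVal v k) := by
  simp only [pvFadeVal]
  have hg0 : PySem.List.pyGetD v 0 0 = v.getD 0 0 := PySem.List.pyGetD_zero v 0
  have hg1 : PySem.List.pyGetD v 1 0 = v.getD 1 0 := by
    have h1 : (1:Int) = ((1:Nat):Int) := rfl
    rw [h1, PySem.List.pyGetD_natCast]
  have hgm2 : PySem.List.pyGetD v (-2) 0 = v.getD (v.length - 2) 0 := by
    rw [PySem.List.pyGetD_neg_ofNat v 2 0 (by omega) (by omega),
      List.getD_eq_getElem v 0 (by omega)]
  have hgm1 : PySem.List.pyGetD v (-1) 0 = v.getD (v.length - 1) 0 := by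
    rw [PySem.List.pyGetD_neg_ofNat v 1 0 (by omega) (by omega),
      List.getD_eq_getElem v 0 (by omega)]
  simp only [pvFadeChannel]
  set ms := (((v.zip (v.drop 1)).zip (v.drop 2)).map
    (fun p => PySem.Int.truncdiv (p.1.1 + p.1.2 + p.2) 3)) with hms
  have hlen : ms.length = v.length - 2 := by simp [hms]; omega
  by_cases hk0 : k = 0
  · subst hk0
    simp [hg0, hg1]
  · by_cases hkl : k = v.length - 1
    · subst hkl
      rw [List.getElem?_append_right (by simp [hlen]; omega)]
      have hidx : v.length - 1 - ([PySem.Int.truncdiv (PySem.List.pyGetD v 0 0 + PySem.List.pyGetD v 1 0) 2] ++ ms).length = 0 := by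
        simp [hlen]; omega
      rw [hidx]
      simp [hgm2, hgm1, hk0]
    · rw [List.getElem?_append_left (by simp [hlen]; omega),
        List.getElem?_append_right (by simp; omega)]
      simp only [List.length_cons, List.length_nil]
      rw [List.getElem?_eq_getElem (l := ms) (by omega)]
      simp only [hms, List.getElem_map, List.getElem_zip, List.getElem_drop]
      simp [hk0, hkl]
      rw [List.getElem?_eq_getElem (show k-1 < v.length by omega),
        List.getElem?_eq_getElem hk,
        List.getElem?_eq_getElem (show k+1 < v.length by omega)]
      simp only [Option.getD_some]
      simp only [show 1 + (k-1) = k from by omega, show 2 + (k-1) = k+1 from by omega]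

lemma audio_fade_len (al : List (List Int)) (h2 : 2 ≤ al.length) :
    (audio_fade al).length = al.length := by
  simp only [audio_fade]
  rw [PySem.List.foldl_append_singleton_eq_map]
  simp [PySem.List.length_pyRange_one]
  omega

lemma chanO (al : List (List Int)) (f : List Int → Int) (j : Nat) (hj : j < al.length) :
    (Option.map f al[j]?).getD 0 = f (al[j]?.getD []) := by
  rw [List.getElem?_eq_getElem hj]; simp

lemma audio_fade_get (al : List (List Int)) (h2 : 2 ≤ al.length) (k : Nat)
    (hk : k < al.length) :
    (audio_fade al)[k]? = some
      [pvFadeVal (al.map (fun x => PySem.List.pyGetD x 0 0)) k,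
       pvFadeVal (al.map (fun x => PySem.List.pyGetD x 1 0)) k] := by
  have hLlen : (al.map (fun x => PySem.List.pyGetD x (0:Int) 0)).length = al.length := by simp
  have hRlen : (al.map (fun x => PySem.List.pyGetD x (1:Int) 0)).length = al.length := by simp
  have hgm2 : PySem.List.pyGetD al (-2) [] = al.getD (al.length - 2) [] := by
    rw [PySem.List.pyGetD_neg_ofNat al 2 [] (by omega) (by omega),
      List.getD_eq_getElem al _ (by omega)]
  have hgm1 : PySem.List.pyGetD al (-1) [] = al.getD (al.length - 1) [] := by
    rw [PySem.List.pyGetD_neg_ofNat al 1 [] (by omega) (by omega),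
      List.getD_eq_getElem al _ (by omega)]
  have e0 : PySem.List.pyGetD al 0 [] = al.getD 0 [] := PySem.List.pyGetD_zero al []
  have e1 : PySem.List.pyGetD al 1 [] = al.getD 1 [] := by
    have h1 : (1:Int) = ((1:Nat):Int) := rfl
    rw [h1, PySem.List.pyGetD_natCast]
  simp only [audio_fade]
  rw [PySem.List.foldl_append_singleton_eq_map]
  set ms := (PySem.List.pyRange 1 (PySem.List.len al - 1) 1).map
    (fun i => pvAvgOfLists [PySem.List.pyGetD al (i - 1) [], PySem.List.pyGetD al i [],
      PySem.List.pyGetD al (i + 1) []]) with hms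
  have hlen : ms.length = al.length - 2 := by
    simp [hms, PySem.List.length_pyRange_one]; omega
  by_cases hk0 : k = 0
  · subst hk0
    simp only [List.append_assoc]
    rw [List.getElem?_append_left (by simp)]
    simp [pvAvgOfLists, pvFadeVal, e0, e1,
      chanO al (fun x => PySem.List.pyGetD x 0 0) 0 (by omega),
      chanO al (fun x => PySem.List.pyGetD x 1 0) 0 (by omega),
      chanO al (fun x => PySem.List.pyGetD x 0 0) 1 (by omega),
      chanO al (fun x => PySem.List.pyGetD x 1 0) 1 (by omega)]
  · by_cases hkl : k = al.length - 1
    · subst hkl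
      rw [List.getElem?_append_right (by simp [hlen]; omega)]
      have hidx : al.length - 1 - ([pvAvgOfLists [PySem.List.pyGetD al 0 [], PySem.List.pyGetD al 1 []]] ++ ms).length = 0 := by
        simp [hlen]; omega
      rw [hidx]
      simp [pvAvgOfLists, pvFadeVal, hgm2, hgm1, hk0, hLlen, hRlen,
        chanO al (fun x => PySem.List.pyGetD x 0 0) (al.length - 2) (by omega),
        chanO al (fun x => PySem.List.pyGetD x 1 0) (al.length - 2) (by omega),
        chanO al (fun x => PySem.List.pyGetD x 0 0) (al.length - 1) (by omega),
        chanO al (fun x => PySem.List.pyGetD x 1 0) (al.length - 1) (by omega)]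
    · rw [List.getElem?_append_left (by simp [hlen]; omega),
        List.getElem?_append_right (by simp; omega)]
      simp only [List.length_cons, List.length_nil]
      rw [List.getElem?_eq_getElem (l := ms) (by omega)]
      simp only [hms, List.getElem_map, PySem.List.getElem_pyRange_one]
      have c1 : (1:Int) + ((k - 1 : Nat) : Int) - 1 = ((k - 1 : Nat) : Int) := by ring
      have c2 : (1:Int) + ((k - 1 : Nat) : Int) = ((k : Nat) : Int) := by
        push_cast [Nat.cast_sub (by omega : 1 ≤ k)]; ring
      have c3 : (1:Int) + ((k - 1 : Nat) : Int) + 1 = ((k + 1 : Nat) : Int) := by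
        push_cast [Nat.cast_sub (by omega : 1 ≤ k)]; ring
      rw [c1, c3, c2, PySem.List.pyGetD_natCast al (k - 1) [],
        PySem.List.pyGetD_natCast al k [], PySem.List.pyGetD_natCast al (k + 1) []]
      simp [pvAvgOfLists, pvFadeVal, hk0, hkl,
        chanO al (fun x => PySem.List.pyGetD x 0 0) (k - 1) (by omega),
        chanO al (fun x => PySem.List.pyGetD x 1 0) (k - 1) (by omega),
        chanO al (fun x => PySem.List.pyGetD x 0 0) k hk,
        chanO al (fun x => PySem.List.pyGetD x 1 0) k hk,
        chanO al (fun x => PySem.List.pyGetD x 0 0) (k + 1) (by omega),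
        chanO al (fun x => PySem.List.pyGetD x 1 0) (k + 1) (by omega)]

theorem audio_fade_main (al : List (List Int)) (h2 : 2 ≤ al.length) :
    audio_fade al = audio_fade_alt al := by
  apply List.ext_getElem?
  intro k
  simp only [audio_fade_alt]
  set L := al.map (fun x => PySem.List.pyGetD x 0 0) with hL
  set R := al.map (fun x => PySem.List.pyGetD x 1 0) with hR
  have hLl : L.length = al.length := by simp [hL]
  have hRl : R.length = al.length := by simp [hR]
  have hfL : (pvFadeChannel L).length = al.length := by rw [pvFade_len L (by omega), hLl]
  have hfR : (pvFadeChannel R).length = al.length := by rw [pvFade_len R (by omega), hRl]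
  by_cases hk : k < al.length
  · rw [audio_fade_get al h2 k hk]
    have hgl : (pvFadeChannel L)[k]'(by omega) = pvFadeVal L k := by
      have h := pvFade_get L (by omega) k (by omega)
      rw [List.getElem?_eq_getElem (by omega)] at h
      exact Option.some.inj h
    have hgr : (pvFadeChannel R)[k]'(by omega) = pvFadeVal R k := by
      have h := pvFade_get R (by omega) k (by omega)
      rw [List.getElem?_eq_getElem (by omega)] at h
      exact Option.some.inj h
    rw [List.getElem?_eq_getElem (by simp; omega)]
    simp only [List.getElem_map, List.getElem_zip, hgl, hgr]
    rw [← hL, ← hR]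
  · rw [List.getElem?_eq_none (by rw [audio_fade_len al h2]; omega),
      List.getElem?_eq_none (by simp; omega)]

-- ===== VERDICT (by name: the statement is the Claim_ definition above) =====
theorem audio_fade_spec : Claim_equal_audio_fade := by
  intro al _ hpre
  exact audio_fade_main al hpre.1
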